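-- pv_equiv track=rewrite | github.com/khimaros/names | names.py | parse_batch_blocks
-- ===== SOURCE A (Python) =====
-- def parse_batch_blocks(data):
--     """parse batch text into list of (meaning_label, [word_lines])."""
--     blocks = []
--     current_meaning = None
--     current_lines = []
--     for line in data.split("\n"):
--         line = line.strip()
--         if not line or line.startswith("#"):
--             continue
--         if line.startswith("= "):
--             if current_meaning is not None:
--                 blocks.append((current_meaning, current_lines))
--             current_meaning = line[2:].strip()
--             current_lines = []
--         else:
--             if current_meaning is not None:
--                 current_lines.append(line)
--     if current_meaning is not None:
--         blocks.append((current_meaning, current_lines))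
--     return blocks
-- ===== SOURCE B (Python) =====
-- def parse_batch_blocks(data):
--     """parse batch text into list of (meaning_label, [word_lines])."""
--     lines = [l for l in (raw.strip() for raw in data.split("\n"))
--              if l and not l.startswith("#")]
--     blocks = []
--     i, n = 0, len(lines)
--     while i < n:
--         if lines[i].startswith("= "):
--             j = i + 1
--             while j < n and not lines[j].startswith("= "):
--                 j += 1
--             blocks.append((lines[i][2:].strip(), lines[i + 1:j]))
--             i = j
--         else:
--             i += 1
--     return blocks
-- ===== Notes on version B (the rewrite author's own statement) =====
-- stated objective: alternative
-- what changed: Two staged passes: first strip/filter every line into a cleaned list, then chunk that list by scanning from each header to the next with an inner span loop and slicing out the word lines, instead of A's streaming current_meaning/current_lines accumulator with a trailing flush.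
import Mathlib
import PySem

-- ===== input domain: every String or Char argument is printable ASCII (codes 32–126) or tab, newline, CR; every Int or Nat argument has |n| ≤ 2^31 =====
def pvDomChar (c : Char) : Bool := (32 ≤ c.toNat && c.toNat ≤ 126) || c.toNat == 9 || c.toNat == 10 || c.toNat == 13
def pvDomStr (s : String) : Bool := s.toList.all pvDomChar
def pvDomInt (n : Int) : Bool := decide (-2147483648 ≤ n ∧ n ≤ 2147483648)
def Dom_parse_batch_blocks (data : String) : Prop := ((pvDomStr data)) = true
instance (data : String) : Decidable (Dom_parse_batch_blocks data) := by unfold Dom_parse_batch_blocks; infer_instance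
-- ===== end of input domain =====

-- B replaces A's streaming accumulator+flush by two staged passes: strip/filter into a cleaned
-- line list, then chunk it header-by-header with an inner span scan; objective: alternative.


-- ===== PORT A =====
-- A's loop state: (blocks, current_meaning, current_lines)
def pbbStepA (st : List (String × List String) × Option String × List String)
    (raw : String) : List (String × List String) × Option String × List String :=
  let line := PySem.Str.strip raw
  if line = "" || PySem.Str.startswith line "#" then st
  else if PySem.Str.startswith line "= " then
    (match st.2.1 with
      | some m => st.1 ++ [(m, st.2.2)]
      | none => st.1,
     some (PySem.Str.strip (PySem.Str.slice line (some 2) none)), [])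
  else
    match st.2.1 with
    | some m => (st.1, some m, st.2.2 ++ [line])
    | none => st

def parse_batch_blocks (data : String) : List (String × List String) :=
  let st : List (String × List String) × Option String × List String :=
    ((PySem.Str.split? data "\n").getD []).foldl pbbStepA ([], none, [])
  match st.2.1 with
  | some m => st.1 ++ [(m, st.2.2)]
  | none => st.1

-- ===== PORT B =====
-- Source B's inner span loop (j scans to the next header) and outer while loop are ported as this
-- recursion on the cleaned suffix: lines[i+1:j] = takeWhile, resume at j = dropWhile.
def pbbChunks : List String → List (String × List String)
  | [] => []
  | l :: ls =>
    if PySem.Str.startswith l "= " then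
      (PySem.Str.strip (PySem.Str.slice l (some 2) none),
        ls.takeWhile (fun x => !PySem.Str.startswith x "= "))
        :: pbbChunks (ls.dropWhile (fun x => !PySem.Str.startswith x "= "))
    else pbbChunks ls
termination_by ls => ls.length
decreasing_by
  · exact Nat.lt_succ_of_le (List.length_dropWhile_le _ _)
  · exact Nat.lt_succ_self _

def parse_batch_blocks_alt (data : String) : List (String × List String) :=
  let lines := (((PySem.Str.split? data "\n").getD []).map PySem.Str.strip).filter
    (fun l => !(l = "" || PySem.Str.startswith l "#"))
  pbbChunks lines

-- ===== PRECONDITION & SPEC =====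
def Spec_parse_batch_blocks (data : String) (out : List (String × List String)) : Prop := out = parse_batch_blocks_alt data
instance (data : String) (out : List (String × List String)) : Decidable (Spec_parse_batch_blocks data out) := by unfold Spec_parse_batch_blocks; infer_instance

-- ===== CLAIM (what is proved, stated in full; the proofs are below) =====
def Claim_equal_parse_batch_blocks : Prop := ∀ (data : String), Dom_parse_batch_blocks data → Spec_parse_batch_blocks data (parse_batch_blocks data)

-- ===== LEMMAS AND PROOFS =====

-- A's step on an already-stripped, kept line
def pbbCore (st : List (String × List String) × Option String × List String)
    (line : String) : List (String × List String) × Option String × List String :=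
  if PySem.Str.startswith line "= " then
    (match st.2.1 with
      | some m => st.1 ++ [(m, st.2.2)]
      | none => st.1,
     some (PySem.Str.strip (PySem.Str.slice line (some 2) none)), [])
  else
    match st.2.1 with
    | some m => (st.1, some m, st.2.2 ++ [line])
    | none => st

def pbbFlush (st : List (String × List String) × Option String × List String) :
    List (String × List String) :=
  match st.2.1 with
  | some m => st.1 ++ [(m, st.2.2)]
  | none => st.1

theorem pbbChunks_cons (l : String) (ls : List String) :
    pbbChunks (l :: ls) =
      if PySem.Str.startswith l "= " then
        (PySem.Str.strip (PySem.Str.slice l (some 2) none),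
          ls.takeWhile (fun x => !PySem.Str.startswith x "= "))
          :: pbbChunks (ls.dropWhile (fun x => !PySem.Str.startswith x "= "))
      else pbbChunks ls := by
  rw [pbbChunks]

theorem pbbStepA_eq_core (raws : List String)
    (st : List (String × List String) × Option String × List String) :
    raws.foldl pbbStepA st =
      ((raws.map PySem.Str.strip).filter
        (fun l => !(l = "" || PySem.Str.startswith l "#"))).foldl pbbCore st := by
  induction raws generalizing st with
  | nil => rfl
  | cons r rs ih =>
    rw [List.map_cons, List.filter_cons]
    by_cases h : (!(decide (PySem.Str.strip r = "") || PySem.Str.startswith (PySem.Str.strip r) "#")) = true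
    · have hstep : pbbStepA st r = pbbCore st (PySem.Str.strip r) := by
        simp only [pbbStepA, pbbCore]
        have hx : (decide (PySem.Str.strip r = "") || PySem.Str.startswith (PySem.Str.strip r) "#") = false := by
          cases hb : (decide (PySem.Str.strip r = "") || PySem.Str.startswith (PySem.Str.strip r) "#")
          · rfl
          · rw [hb] at h; simp at h
        rw [hx]
        simp
      rw [List.foldl_cons, hstep, ih]
      simp only [h, if_true, List.foldl_cons]
    · have hstep : pbbStepA st r = st := by
        simp only [pbbStepA]
        have hx : (decide (PySem.Str.strip r = "") || PySem.Str.startswith (PySem.Str.strip r) "#") = true := by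
          cases hb : (decide (PySem.Str.strip r = "") || PySem.Str.startswith (PySem.Str.strip r) "#")
          · rw [hb] at h; simp at h
          · rfl
        rw [hx]
        simp
      rw [List.foldl_cons, hstep, ih]
      simp only [h, Bool.false_eq_true, if_false]

theorem pbbCore_some (ls : List String) (bs : List (String × List String))
    (m : String) (cl : List String) :
    pbbFlush (ls.foldl pbbCore (bs, some m, cl)) =
      bs ++ (m, cl ++ ls.takeWhile (fun x => !PySem.Str.startswith x "= "))
        :: pbbChunks (ls.dropWhile (fun x => !PySem.Str.startswith x "= ")) := by
  induction ls generalizing bs m cl with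
  | nil => simp [pbbFlush, pbbChunks]
  | cons l ls ih =>
    by_cases h : PySem.Str.startswith l "= " = true
    · have hp : (!PySem.Str.startswith l "= ") = false := by rw [h]; rfl
      rw [List.foldl_cons]
      simp only [pbbCore, if_pos h]
      rw [ih, List.takeWhile_cons, List.dropWhile_cons]
      simp only [hp, Bool.false_eq_true, if_false]
      rw [pbbChunks_cons, if_pos h]
      simp
    · have hp : (!PySem.Str.startswith l "= ") = true := by
        cases hb : PySem.Str.startswith l "= " with
        | false => rfl
        | true => exact absurd hb h
      rw [List.foldl_cons]
      simp only [pbbCore, if_neg h]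
      rw [ih, List.takeWhile_cons, List.dropWhile_cons]
      simp only [hp, if_true]
      simp

theorem pbbCore_none (ls : List String) (bs : List (String × List String))
    (cl : List String) :
    pbbFlush (ls.foldl pbbCore (bs, none, cl)) = bs ++ pbbChunks ls := by
  induction ls generalizing cl with
  | nil => simp [pbbFlush, pbbChunks]
  | cons l ls ih =>
    by_cases h : PySem.Str.startswith l "= " = true
    · rw [List.foldl_cons]
      simp only [pbbCore, if_pos h]
      rw [pbbCore_some, pbbChunks_cons, if_pos h]
      simp
    · rw [List.foldl_cons]
      simp only [pbbCore, if_neg h]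
      rw [ih, pbbChunks_cons, if_neg h]

-- ===== VERDICT (by name: the statement is the Claim_ definition above) =====
theorem parse_batch_blocks_spec : Claim_equal_parse_batch_blocks := by
  intro data _
  show parse_batch_blocks data = parse_batch_blocks_alt data
  unfold parse_batch_blocks parse_batch_blocks_alt
  rw [pbbStepA_eq_core]
  simpa using pbbCore_none _ [] []
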